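-- pv_equiv track=rewrite | github.com/Samisaac20/maze-solver | backend/app/maze_logic/maze_gen.py | _count_junctions
-- ===== SOURCE A (Python) =====
-- from typing import Iterable, List, Sequence, Tuple
--
-- Grid = List[List[int]]
--
-- Cell = Tuple[int, int]
--
-- def _count_open_neighbors(cell: Cell, grid: Grid) -> int:
--     """Count orthogonally adjacent open cells."""
--     r, c = cell
--     count = 0
--     for dr, dc in ((0, 1), (0, -1), (1, 0), (-1, 0)):
--         nr, nc = r + dr, c + dc
--         if 0 <= nr < len(grid) and 0 <= nc < len(grid[0]):
--             if grid[nr][nc] == 0: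
--                 count += 1
--     return count
--
-- def _count_junctions(grid: Grid) -> int:
--     """Count cells with 3+ exits (decision points)."""
--     junctions = 0
--     for r in range(1, len(grid) - 1):
--         for c in range(1, len(grid[0]) - 1):
--             if grid[r][c] == 0:  # Open cell
--                 if _count_open_neighbors((r, c), grid) >= 3:
--                     junctions += 1
--     return junctions
-- ===== SOURCE B (Python) =====
-- def _count_junctions(grid):
--     """Count cells with 3+ exits (decision points)."""
--     # Degree table: one pass over adjacency edges (right and down neighbours only,
--     # each edge incrementing BOTH endpoints), then one pass counting interior
--     # open cells whose accumulated degree is >= 3.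
--     deg = [[0] * len(row) for row in grid]
--     for r in range(len(grid)):
--         row = grid[r]
--         for c in range(len(row) - 1):
--             if row[c] == 0 and row[c + 1] == 0:
--                 deg[r][c] += 1
--                 deg[r][c + 1] += 1
--     for r in range(len(grid) - 1):
--         for c in range(min(len(grid[r]), len(grid[r + 1]))):
--             if grid[r][c] == 0 and grid[r + 1][c] == 0:
--                 deg[r][c] += 1
--                 deg[r + 1][c] += 1
--     total = 0
--     for r in range(1, len(grid) - 1):
--         for c in range(1, len(grid[0]) - 1):
--             if grid[r][c] == 0 and deg[r][c] >= 3: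
--                 total += 1
--     return total
-- ===== Notes on version B (the rewrite author's own statement) =====
-- stated objective: alternative
-- what changed: B builds a rows-by-cols degree table in one pass over adjacency edges (each open cell looks only at its right and down neighbour and an open-open edge increments the degree of BOTH endpoints), then counts interior open cells with degree >= 3, instead of A's per-cell four-direction bounds-checked neighbour scan.
import Mathlib
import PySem

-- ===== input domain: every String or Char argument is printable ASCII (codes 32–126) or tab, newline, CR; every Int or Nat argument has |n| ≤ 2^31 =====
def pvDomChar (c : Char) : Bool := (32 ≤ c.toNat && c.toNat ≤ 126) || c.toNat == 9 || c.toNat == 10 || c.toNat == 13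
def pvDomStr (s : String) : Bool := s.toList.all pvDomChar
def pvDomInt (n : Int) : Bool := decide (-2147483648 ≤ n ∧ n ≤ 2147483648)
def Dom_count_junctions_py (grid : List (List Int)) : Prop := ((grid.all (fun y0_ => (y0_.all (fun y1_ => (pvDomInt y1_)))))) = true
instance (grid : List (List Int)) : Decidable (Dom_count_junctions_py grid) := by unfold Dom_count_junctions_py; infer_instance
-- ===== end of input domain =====

-- B replaces A's per-cell four-direction neighbour scan by a degree table: one pass over the
-- adjacency edges (right/down neighbour only, each open-open edge incrementing the degree of
-- BOTH endpoints), then a pass counting interior open cells of degree >= 3 (objective: alternative).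

-- ===== PORT A =====
-- grid[r][c]: wherever A evaluates it under Pre_ both indices are in range, so the defaults are never reached
def pvCell (grid : List (List Int)) (r c : Int) : Int :=
  PySem.List.pyGetD (PySem.List.pyGetD grid r []) c 1

-- the body of the 'for dr, dc in …' loop of _count_open_neighbors
def pvNbStep (grid : List (List Int)) (cell : Int × Int) (count : Int) (d : Int × Int) : Int :=
  let nr := cell.1 + d.1
  let nc := cell.2 + d.2
  if 0 ≤ nr ∧ nr < (grid.length : Int) ∧ 0 ≤ nc ∧ nc < ((PySem.List.pyGetD grid 0 []).length : Int) then
    (if pvCell grid nr nc == 0 then count + 1 else count)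
  else count

def count_open_neighbors_py (cell : Int × Int) (grid : List (List Int)) : Int :=
  [((0 : Int), (1 : Int)), (0, -1), (1, 0), (-1, 0)].foldl (pvNbStep grid cell) 0

def count_junctions_py (grid : List (List Int)) : Int :=
  (PySem.List.pyRange 1 ((grid.length : Int) - 1)).foldl (fun junctions r =>
    (PySem.List.pyRange 1 (((PySem.List.pyGetD grid 0 []).length : Int) - 1)).foldl (fun junctions c =>
      if pvCell grid r c == 0 then
        (if count_open_neighbors_py (r, c) grid ≥ 3 then junctions + 1 else junctions)
      else junctions) junctions) 0

-- ===== PORT B =====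
-- 'deg[p[0]][p[1]] += 1'; in Source B both indices are nonnegative and in range, so List.modify is exact
def pvBump (deg : List (List Int)) (p : Nat × Nat) : List (List Int) :=
  deg.modify p.1 (fun row => row.modify p.2 (· + 1))

-- Source B's loops run over range(…) of nonnegative ints, ported as List.range / the same pyRange as A's
-- final scan; 'grid[r]' / 'row[c]' with those in-range nonnegative indices is getD (default unreachable)
def count_junctions_py_alt (grid : List (List Int)) : Int :=
  let deg0 := grid.map (fun row => row.map (fun _ => (0 : Int)))
  let deg1 := (List.range grid.length).foldl (fun deg r =>
      let row := grid.getD r []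
      (List.range (row.length - 1)).foldl (fun deg c =>
        if row.getD c 1 == 0 && row.getD (c + 1) 1 == 0 then
          pvBump (pvBump deg (r, c)) (r, c + 1)
        else deg) deg) deg0
  let deg2 := (List.range (grid.length - 1)).foldl (fun deg r =>
      (List.range (min (grid.getD r []).length (grid.getD (r + 1) []).length)).foldl (fun deg c =>
        if (grid.getD r []).getD c 1 == 0 && (grid.getD (r + 1) []).getD c 1 == 0 then
          pvBump (pvBump deg (r, c)) (r + 1, c)
        else deg) deg) deg1
  (PySem.List.pyRange 1 ((grid.length : Int) - 1)).foldl (fun total r =>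
    (PySem.List.pyRange 1 (((PySem.List.pyGetD grid 0 []).length : Int) - 1)).foldl (fun total c =>
      if PySem.List.pyGetD (PySem.List.pyGetD grid r []) c 1 == 0 then
        (if PySem.List.pyGetD (PySem.List.pyGetD deg2 r []) c 0 ≥ 3 then total + 1 else total)
      else total) total) 0

-- ===== PRECONDITION & SPEC =====
-- Pre_ holds exactly when the interior scan never indexes past the end of a (ragged) row:
-- every interior column index exists in its row, and around every open interior cell the four
-- neighbour accesses exist in their rows; outside Pre_ the Python A raises IndexError.
def Pre_count_junctions_py (grid : List (List Int)) : Prop :=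
  ∀ r ∈ PySem.List.pyRange 1 ((grid.length : Int) - 1),
    ∀ c ∈ PySem.List.pyRange 1 (((PySem.List.pyGetD grid 0 []).length : Int) - 1),
      c < ((PySem.List.pyGetD grid r []).length : Int) ∧
      (PySem.List.pyGetD (PySem.List.pyGetD grid r []) c 1 = 0 →
        c + 1 < ((PySem.List.pyGetD grid r []).length : Int) ∧
        c < ((PySem.List.pyGetD grid (r + 1) []).length : Int) ∧
        c < ((PySem.List.pyGetD grid (r - 1) []).length : Int))
instance (grid : List (List Int)) : Decidable (Pre_count_junctions_py grid) := by
  unfold Pre_count_junctions_py; infer_instance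

def pvWitness_count_junctions_py : List (List Int) := [[0, 0, 0], [0, 0, 0], [1, 0, 1]]

def Spec_count_junctions_py (grid : List (List Int)) (out : Int) : Prop := out = count_junctions_py_alt grid
instance (grid : List (List Int)) (out : Int) : Decidable (Spec_count_junctions_py grid out) := by unfold Spec_count_junctions_py; infer_instance

-- ===== CLAIM (what is proved, stated in full; the proofs are below) =====
def Claim_equal_count_junctions_py : Prop := ∀ (grid : List (List Int)), Dom_count_junctions_py grid → Pre_count_junctions_py grid → Spec_count_junctions_py grid (count_junctions_py grid)

-- ===== LEMMAS AND PROOFS =====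

-- the entry (r, c) of the degree table, and the shape-preservation facts for pvBump
def pvDget (deg : List (List Int)) (r c : Nat) : Int := (deg.getD r []).getD c 0

lemma pvBump_length (deg : List (List Int)) (p : Nat × Nat) :
    (pvBump deg p).length = deg.length := by
  simp [pvBump]

lemma pvBump_row (deg : List (List Int)) (p : Nat × Nat) (r : Nat) :
    (pvBump deg p).getD r [] =
      if p.1 = r then (deg.getD r []).modify p.2 (· + 1) else deg.getD r [] := by
  unfold pvBump
  rw [List.getD_eq_getElem?_getD, List.getElem?_modify]
  by_cases h : p.1 = r
  · subst h
    cases hx : deg[p.1]? with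
    | none => simp [List.getD_eq_getElem?_getD, hx]
    | some row => simp [List.getD_eq_getElem?_getD, hx]
  · simp [h, List.getD_eq_getElem?_getD]

lemma pvBump_rowlen (deg : List (List Int)) (p : Nat × Nat) (r : Nat) :
    ((pvBump deg p).getD r []).length = (deg.getD r []).length := by
  rw [pvBump_row]
  by_cases h : p.1 = r <;> simp [h]

lemma pvGetD_modify_add_one (row : List Int) (i c : Nat) (d : Int) :
    (row.modify i (· + 1)).getD c d =
      if i = c ∧ c < row.length then row.getD c d + 1 else row.getD c d := by
  rw [List.getD_eq_getElem?_getD, List.getElem?_modify, List.getD_eq_getElem?_getD]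
  by_cases h1 : i = c
  · subst h1
    by_cases h2 : i < row.length
    · rw [List.getElem?_eq_getElem h2]; simp [h2]
    · rw [List.getElem?_eq_none (by omega)]; simp [h2]
  · have : ¬ (i = c ∧ c < row.length) := by tauto
    rw [if_neg this]
    cases row[c]? <;> simp [h1]

lemma pvDget_bump (deg : List (List Int)) (p : Nat × Nat) (r c : Nat)
    (hp : p.1 < deg.length ∧ p.2 < (deg.getD p.1 []).length) :
    pvDget (pvBump deg p) r c = pvDget deg r c + (if p = (r, c) then 1 else 0) := by
  unfold pvDget
  rw [pvBump_row]
  by_cases h1 : p.1 = r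
  · rw [if_pos h1, pvGetD_modify_add_one]
    by_cases h2 : p.2 = c ∧ c < (deg.getD r []).length
    · have hpc : p = (r, c) := by
        cases p; simp only [Prod.mk.injEq]; exact ⟨h1, h2.1⟩
      rw [if_pos h2, if_pos hpc]
    · have hpc : p ≠ (r, c) := by
        intro he
        apply h2
        constructor
        · rw [he]
        · have h' := hp.2
          rw [he] at h'
          rw [← h1, he]
          simpa using h'
      rw [if_neg h2, if_neg hpc, add_zero]
  · have hpc : p ≠ (r, c) := by intro he; apply h1; rw [he]
    rw [if_neg h1, if_neg hpc, add_zero]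

lemma pvDget_foldl_bump (ps : List (Nat × Nat)) (deg : List (List Int)) (r c : Nat)
    (hv : ∀ p ∈ ps, p.1 < deg.length ∧ p.2 < (deg.getD p.1 []).length) :
    pvDget (ps.foldl pvBump deg) r c = pvDget deg r c + (ps.count (r, c) : Int) := by
  induction ps generalizing deg with
  | nil => simp
  | cons q qs ih =>
    rw [List.foldl_cons, ih _ (by
      intro p hp
      rw [pvBump_length, pvBump_rowlen]
      exact hv p (List.mem_cons_of_mem q hp))]
    rw [pvDget_bump deg q r c (hv q (List.mem_cons_self))]
    rw [List.count_cons]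
    by_cases h : q = (r, c) <;> simp [h] <;> push_cast <;> ring

lemma pvFoldl_foldl_flatMap {α β γ : Type} (xs : List α) (f : α → List β) (g : γ → β → γ) (i : γ) :
    xs.foldl (fun s x => (f x).foldl g s) i = (xs.flatMap f).foldl g i := by
  induction xs generalizing i with
  | nil => simp
  | cons x xs ih => simp [List.flatMap_cons, List.foldl_append, ih]

-- the edge lists of Source B's two bump passes
def pvCondH (grid : List (List Int)) (r c : Nat) : Bool :=
  ((grid.getD r []).getD c 1 == 0) && ((grid.getD r []).getD (c + 1) 1 == 0)

def pvCondV (grid : List (List Int)) (r c : Nat) : Bool :=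
  ((grid.getD r []).getD c 1 == 0) && ((grid.getD (r + 1) []).getD c 1 == 0)

def pvPosH (grid : List (List Int)) : List (Nat × Nat) :=
  (List.range grid.length).flatMap (fun r =>
    (List.range ((grid.getD r []).length - 1)).flatMap (fun c =>
      if pvCondH grid r c then [(r, c), (r, c + 1)] else []))

def pvPosV (grid : List (List Int)) : List (Nat × Nat) :=
  (List.range (grid.length - 1)).flatMap (fun r =>
    (List.range (min (grid.getD r []).length ((grid.getD (r + 1) []).length))).flatMap (fun c =>
      if pvCondV grid r c then [(r, c), (r + 1, c)] else []))

def pvDeg0 (grid : List (List Int)) : List (List Int) :=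
  grid.map (fun row => row.map (fun _ => (0 : Int)))

def pvDeg (grid : List (List Int)) : List (List Int) :=
  (pvPosH grid ++ pvPosV grid).foldl pvBump (pvDeg0 grid)

lemma pvDeg0_length (grid : List (List Int)) : (pvDeg0 grid).length = grid.length := by
  simp [pvDeg0]

lemma pvGetD_map_zero (row : List Int) (c : Nat) :
    (row.map (fun _ => (0 : Int))).getD c 0 = 0 := by
  rcases Nat.lt_or_ge c row.length with h | h
  · rw [List.getD_eq_getElem _ _ (by simpa using h)]; simp
  · rw [List.getD_eq_default _ _ (by simpa using h)]

lemma pvDeg0_row (grid : List (List Int)) (r : Nat) :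
    (pvDeg0 grid).getD r [] = (grid.getD r []).map (fun _ => (0 : Int)) := by
  unfold pvDeg0
  rcases Nat.lt_or_ge r grid.length with h | h
  · rw [List.getD_eq_getElem _ _ (by simpa using h), List.getD_eq_getElem _ _ h]
    simp
  · rw [List.getD_eq_default _ _ (by simpa using h), List.getD_eq_default _ _ h]
    simp

lemma pvDeg0_rowlen (grid : List (List Int)) (r : Nat) :
    ((pvDeg0 grid).getD r []).length = (grid.getD r []).length := by
  rw [pvDeg0_row]; simp

lemma pvDeg0_get (grid : List (List Int)) (r c : Nat) : pvDget (pvDeg0 grid) r c = 0 := by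
  unfold pvDget
  rw [pvDeg0_row, pvGetD_map_zero]

-- Source B's degree table: the two passes are the fold of pvBump over the edge lists
lemma pvAlt_eq_deg (grid : List (List Int)) :
    count_junctions_py_alt grid =
      (PySem.List.pyRange 1 ((grid.length : Int) - 1)).foldl (fun total r =>
        (PySem.List.pyRange 1 (((PySem.List.pyGetD grid 0 []).length : Int) - 1)).foldl (fun total c =>
          if PySem.List.pyGetD (PySem.List.pyGetD grid r []) c 1 == 0 then
            (if PySem.List.pyGetD (PySem.List.pyGetD (pvDeg grid) r []) c 0 ≥ 3 then total + 1 else total)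
          else total) total) 0 := by
  unfold count_junctions_py_alt
  have hH : (List.range grid.length).foldl (fun deg r =>
      (List.range (((grid.getD r []).length) - 1)).foldl (fun deg c =>
        if (grid.getD r []).getD c 1 == 0 && (grid.getD r []).getD (c + 1) 1 == 0 then
          pvBump (pvBump deg (r, c)) (r, c + 1)
        else deg) deg) (grid.map (fun row => row.map (fun _ => (0 : Int))))
      = (pvPosH grid).foldl pvBump (pvDeg0 grid) := by
    unfold pvPosH pvDeg0
    rw [← pvFoldl_foldl_flatMap]
    apply PySem.List.foldl_congr_mem
    intro acc r _
    rw [← pvFoldl_foldl_flatMap]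
    apply PySem.List.foldl_congr_mem
    intro acc2 c _
    show (if pvCondH grid r c then pvBump (pvBump acc2 (r, c)) (r, c + 1) else acc2) =
      List.foldl pvBump acc2 (if pvCondH grid r c then [(r, c), (r, c + 1)] else [])
    by_cases h : pvCondH grid r c <;> simp [h, List.foldl]
  have hV : ∀ d : List (List Int), (List.range (grid.length - 1)).foldl (fun deg r =>
      (List.range (min (grid.getD r []).length ((grid.getD (r + 1) []).length))).foldl (fun deg c =>
        if (grid.getD r []).getD c 1 == 0 && (grid.getD (r + 1) []).getD c 1 == 0 then
          pvBump (pvBump deg (r, c)) (r + 1, c)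
        else deg) deg) d = (pvPosV grid).foldl pvBump d := by
    intro d
    unfold pvPosV
    rw [← pvFoldl_foldl_flatMap]
    apply PySem.List.foldl_congr_mem
    intro acc r _
    rw [← pvFoldl_foldl_flatMap]
    apply PySem.List.foldl_congr_mem
    intro acc2 c _
    show (if pvCondV grid r c then pvBump (pvBump acc2 (r, c)) (r + 1, c) else acc2) =
      List.foldl pvBump acc2 (if pvCondV grid r c then [(r, c), (r + 1, c)] else [])
    by_cases h : pvCondV grid r c <;> simp [h, List.foldl]
  simp only [hH, hV]
  rw [← List.foldl_append]
  rfl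

-- validity: every bump of either pass targets an existing entry of the degree table
lemma pvPos_valid (grid : List (List Int)) :
    ∀ p ∈ pvPosH grid ++ pvPosV grid,
      p.1 < (pvDeg0 grid).length ∧ p.2 < ((pvDeg0 grid).getD p.1 []).length := by
  intro p hp
  rw [pvDeg0_length, pvDeg0_rowlen]
  rcases List.mem_append.1 hp with h | h
  · unfold pvPosH at h
    obtain ⟨r, hr, hin⟩ := List.mem_flatMap.1 h
    obtain ⟨c, hc, hin2⟩ := List.mem_flatMap.1 hin
    rw [List.mem_range] at hr hc
    by_cases hcond : pvCondH grid r c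
    · rw [if_pos hcond] at hin2
      simp only [List.mem_cons, List.not_mem_nil, or_false] at hin2
      rcases hin2 with rfl | rfl
      · exact ⟨(by omega : r < grid.length), (by omega : c < (grid.getD r []).length)⟩
      · exact ⟨(by omega : r < grid.length), (by omega : c + 1 < (grid.getD r []).length)⟩
    · rw [if_neg hcond] at hin2; cases hin2
  · unfold pvPosV at h
    obtain ⟨r, hr, hin⟩ := List.mem_flatMap.1 h
    obtain ⟨c, hc, hin2⟩ := List.mem_flatMap.1 hin
    rw [List.mem_range] at hr hc
    rw [Nat.lt_min] at hc
    by_cases hcond : pvCondV grid r c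
    · rw [if_pos hcond] at hin2
      simp only [List.mem_cons, List.not_mem_nil, or_false] at hin2
      rcases hin2 with rfl | rfl
      · exact ⟨(by omega : r < grid.length), (by omega : c < (grid.getD r []).length)⟩
      · exact ⟨(by omega : r + 1 < grid.length), (by omega : c < (grid.getD (r + 1) []).length)⟩
    · rw [if_neg hcond] at hin2; cases hin2

-- sums over List.range of a function supported at one / two points
lemma pvSum_range_support1 (m : Nat) (g : Nat → Nat) (a : Nat)
    (h : ∀ x, x ≠ a → g x = 0) :
    ((List.range m).map g).sum = if a < m then g a else 0 := by
  induction m with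
  | zero => simp
  | succ m ih =>
    rw [List.range_succ, List.map_append, List.sum_append, ih]
    simp only [List.map_cons, List.map_nil, List.sum_cons, List.sum_nil, add_zero]
    by_cases hm : m = a
    · subst hm
      split_ifs <;> omega
    · rw [h m hm, add_zero]
      split_ifs <;> omega

lemma pvSum_range_support2 (m : Nat) (g : Nat → Nat) (a b : Nat) (hab : a ≠ b)
    (h : ∀ x, x ≠ a → x ≠ b → g x = 0) :
    ((List.range m).map g).sum =
      (if a < m then g a else 0) + (if b < m then g b else 0) := by
  induction m with
  | zero => simp
  | succ m ih =>
    rw [List.range_succ, List.map_append, List.sum_append, ih]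
    simp only [List.map_cons, List.map_nil, List.sum_cons, List.sum_nil, add_zero]
    by_cases hma : m = a
    · subst hma
      split_ifs <;> omega
    · by_cases hmb : m = b
      · subst hmb
        split_ifs <;> omega
      · rw [h m hma hmb, add_zero]
        split_ifs <;> omega

-- count of a fixed interior target in the horizontal edge list
lemma pvCount_posH (grid : List (List Int)) (r c : Nat)
    (hr : r < grid.length) (hc1 : 1 ≤ c) (hc2 : c + 1 < (grid.getD r []).length) :
    (pvPosH grid).count (r, c) =
      (if pvCondH grid r c then 1 else 0) + (if pvCondH grid r (c - 1) then 1 else 0) := by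
  unfold pvPosH
  rw [List.count_flatMap]
  have hinner : ∀ r' : Nat,
      ((List.range ((grid.getD r' []).length - 1)).flatMap (fun c' =>
        if pvCondH grid r' c' then [(r', c'), (r', c' + 1)] else [])).count (r, c) =
      if r' = r then
        ((if pvCondH grid r c then 1 else 0) + (if pvCondH grid r (c - 1) then 1 else 0)) else 0 := by
    intro r'
    rw [List.count_flatMap]
    by_cases hr' : r' = r
    · rw [hr', if_pos rfl]
      have hg : ∀ x, x ≠ c → x ≠ c - 1 →
          (List.count (r, c) ∘ fun c' =>
            if pvCondH grid r c' then [(r, c'), (r, c' + 1)] else []) x = 0 := by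
        intro x hx1 hx2
        simp only [Function.comp]
        by_cases hcnd : pvCondH grid r x
        · rw [if_pos hcnd]
          have hn1 : ((r, x) : Nat × Nat) ≠ (r, c) := by
            simp only [ne_eq, Prod.mk.injEq]; omega
          have hn2 : ((r, x + 1) : Nat × Nat) ≠ (r, c) := by
            simp only [ne_eq, Prod.mk.injEq]; omega
          simp [List.count_cons, hn1, hn2]
        · rw [if_neg hcnd]; simp
      rw [pvSum_range_support2 _ _ c (c - 1) (by omega) hg]
      simp only [Function.comp]
      rw [if_pos (by omega : c < (grid.getD r []).length - 1),
          if_pos (by omega : c - 1 < (grid.getD r []).length - 1)]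
      have e1 : (if pvCondH grid r c then [(r, c), (r, c + 1)] else []).count (r, c) =
          if pvCondH grid r c then 1 else 0 := by
        have hn : ((r, c + 1) : Nat × Nat) ≠ (r, c) := by
          simp only [ne_eq, Prod.mk.injEq]; omega
        by_cases hcnd : pvCondH grid r c
        · rw [if_pos hcnd, if_pos hcnd]
          simp [List.count_cons, hn]
        · rw [if_neg hcnd, if_neg hcnd]; simp
      have e2 : (if pvCondH grid r (c - 1) then [(r, c - 1), (r, c - 1 + 1)] else []).count (r, c) =
          if pvCondH grid r (c - 1) then 1 else 0 := by
        have hn : ((r, c - 1) : Nat × Nat) ≠ (r, c) := by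
          simp only [ne_eq, Prod.mk.injEq]; omega
        have he : c - 1 + 1 = c := by omega
        by_cases hcnd : pvCondH grid r (c - 1)
        · rw [if_pos hcnd, if_pos hcnd, he]
          simp [List.count_cons, hn]
        · rw [if_neg hcnd, if_neg hcnd]; simp
      rw [e1, e2]
    · rw [if_neg hr']
      have : ∀ x ∈ List.range ((grid.getD r' []).length - 1),
          (List.count (r, c) ∘ fun c' =>
            if pvCondH grid r' c' then [(r', c'), (r', c' + 1)] else []) x = 0 := by
        intro x _
        simp only [Function.comp]
        by_cases hcnd : pvCondH grid r' x
        · rw [if_pos hcnd]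
          have hn1 : ((r', x) : Nat × Nat) ≠ (r, c) := by
            simp only [ne_eq, Prod.mk.injEq]; tauto
          have hn2 : ((r', x + 1) : Nat × Nat) ≠ (r, c) := by
            simp only [ne_eq, Prod.mk.injEq]; tauto
          simp [List.count_cons, hn1, hn2]
        · rw [if_neg hcnd]; simp
      rw [List.sum_eq_zero]
      intro y hy
      obtain ⟨x, hx, rfl⟩ := List.mem_map.1 hy
      exact this x hx
  have : (List.map (List.count (r, c) ∘ fun r' =>
        (List.range ((grid.getD r' []).length - 1)).flatMap (fun c' =>
          if pvCondH grid r' c' then [(r', c'), (r', c' + 1)] else [])) (List.range grid.length)).sum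
      = ((List.range grid.length).map (fun r' => if r' = r then
          ((if pvCondH grid r c then 1 else 0) + (if pvCondH grid r (c - 1) then 1 else 0)) else 0)).sum := by
    apply congrArg
    apply List.map_congr_left
    intro r' _
    exact hinner r'
  rw [this, pvSum_range_support1 _ _ r (by intro x hx; simp [hx]), if_pos hr]
  simp

-- count of a fixed interior target in the vertical edge list
lemma pvCount_posV (grid : List (List Int)) (r c : Nat)
    (hr1 : 1 ≤ r) (hr2 : r + 1 < grid.length)
    (hcup : c < min ((grid.getD (r - 1) []).length) ((grid.getD r []).length))
    (hcdn : c < min ((grid.getD r []).length) ((grid.getD (r + 1) []).length)) :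
    (pvPosV grid).count (r, c) =
      (if pvCondV grid r c then 1 else 0) + (if pvCondV grid (r - 1) c then 1 else 0) := by
  unfold pvPosV
  rw [List.count_flatMap]
  have hcnt : ∀ r' c', List.count ((r, c) : Nat × Nat)
      (if pvCondV grid r' c' then [(r', c'), (r' + 1, c')] else []) =
      if c' = c ∧ pvCondV grid r' c' ∧ (r' = r ∨ r' + 1 = r) then 1 else 0 := by
    intro r' c'
    by_cases hcnd : pvCondV grid r' c'
    · simp only [hcnd, if_true, List.count_cons, List.count_nil, beq_iff_eq, Prod.mk.injEq,
        and_true, true_and]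
      split_ifs <;> omega
    · simp [hcnd]
  have hinner : ∀ r', (List.count ((r, c) : Nat × Nat) ∘ fun r' =>
        (List.range (min ((grid.getD r' []).length) ((grid.getD (r' + 1) []).length))).flatMap
          (fun c' => if pvCondV grid r' c' then [(r', c'), (r' + 1, c')] else [])) r' =
      if r' = r then (if pvCondV grid r c then 1 else 0)
      else if r' = r - 1 then (if pvCondV grid (r - 1) c then 1 else 0)
      else 0 := by
    intro r'
    simp only [Function.comp]
    rw [List.count_flatMap]
    by_cases h1 : r' = r
    · rw [h1, if_pos rfl]
      rw [List.map_congr_left (fun x _ => by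
        simp only [Function.comp]; exact hcnt r x)]
      rw [pvSum_range_support1 _ _ c (by intro x hx; simp [hx])]
      rw [if_pos (by omega : c < min ((grid.getD r []).length) ((grid.getD (r + 1) []).length))]
      simp
    · rw [if_neg h1]
      by_cases h2 : r' = r - 1
      · rw [h2, if_pos rfl]
        rw [List.map_congr_left (fun x _ => by
          simp only [Function.comp]; exact hcnt (r - 1) x)]
        rw [pvSum_range_support1 _ _ c (by intro x hx; simp [hx])]
        rw [show r - 1 + 1 = r from by omega]
        rw [if_pos (by omega : c < min ((grid.getD (r - 1) []).length) ((grid.getD r []).length))]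
        simp
      · rw [if_neg h2]
        apply List.sum_eq_zero
        intro y hy
        obtain ⟨x, hx, rfl⟩ := List.mem_map.1 hy
        simp only [Function.comp]
        rw [hcnt r' x, if_neg (by
          rintro ⟨_, _, h3 | h3⟩
          · exact h1 h3
          · omega)]
  have hmap : (List.map (List.count ((r, c) : Nat × Nat) ∘ fun r' =>
        (List.range (min ((grid.getD r' []).length) ((grid.getD (r' + 1) []).length))).flatMap
          (fun c' => if pvCondV grid r' c' then [(r', c'), (r' + 1, c')] else []))
        (List.range (grid.length - 1))).sum
      = ((List.range (grid.length - 1)).map (fun r' =>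
          if r' = r then (if pvCondV grid r c then 1 else 0)
          else if r' = r - 1 then (if pvCondV grid (r - 1) c then 1 else 0)
          else 0)).sum := by
    apply congrArg
    apply List.map_congr_left
    intro r' _
    exact hinner r'
  rw [hmap]
  rw [pvSum_range_support2 _ _ r (r - 1) (by omega) (by
    intro x hx1 hx2; simp [hx1, hx2])]
  rw [if_pos (by omega : r < grid.length - 1), if_pos (by omega : r - 1 < grid.length - 1)]
  have hne : ¬ (r - 1 = r) := by omega
  simp [hne]

-- the degree of an interior open cell equals A's four-neighbour indicator sum
lemma pvDeg_get (grid : List (List Int)) (r c : Nat)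
    (hr1 : 1 ≤ r) (hr2 : r + 1 < grid.length) (hc1 : 1 ≤ c)
    (hcr : c + 1 < (grid.getD r []).length)
    (hcu : c < (grid.getD (r - 1) []).length)
    (hcd : c < (grid.getD (r + 1) []).length) :
    pvDget (pvDeg grid) r c =
      (if pvCondH grid r c then 1 else 0) + (if pvCondH grid r (c - 1) then 1 else 0) +
      ((if pvCondV grid r c then 1 else 0) + (if pvCondV grid (r - 1) c then 1 else 0)) := by
  unfold pvDeg
  rw [pvDget_foldl_bump _ _ _ _ (pvPos_valid grid), pvDeg0_get, List.count_append]
  rw [pvCount_posH grid r c (by omega) hc1 hcr,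
      pvCount_posV grid r c hr1 hr2 (by omega) (by omega)]
  push_cast
  ring

-- the guarded neighbour step of A when the bounds check passes
lemma pvNbStep_pos (grid : List (List Int)) (cell : Int × Int) (count : Int) (d : Int × Int)
    (h : 0 ≤ cell.1 + d.1 ∧ cell.1 + d.1 < (grid.length : Int) ∧ 0 ≤ cell.2 + d.2 ∧
         cell.2 + d.2 < ((PySem.List.pyGetD grid 0 []).length : Int)) :
    pvNbStep grid cell count d =
      if pvCell grid (cell.1 + d.1) (cell.2 + d.2) == 0 then count + 1 else count := by
  unfold pvNbStep
  rw [if_pos h]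

-- the two per-cell junction tests agree on interior open cells admitted by Pre_
lemma pvCellwise (grid : List (List Int)) (rn cn : Nat)
    (hr1 : 1 ≤ rn) (hr2 : rn + 1 < grid.length) (hc1 : 1 ≤ cn)
    (hcols : cn + 1 < (PySem.List.pyGetD grid 0 []).length)
    (hopen : (grid.getD rn []).getD cn 1 = 0)
    (hcr : cn + 1 < (grid.getD rn []).length)
    (hcu : cn < (grid.getD (rn - 1) []).length)
    (hcd : cn < (grid.getD (rn + 1) []).length) :
    count_open_neighbors_py ((rn : Int), (cn : Int)) grid = pvDget (pvDeg grid) rn cn := by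
  rw [pvDeg_get grid rn cn hr1 hr2 hc1 hcr hcu hcd]
  unfold count_open_neighbors_py
  rw [List.foldl_cons, List.foldl_cons, List.foldl_cons, List.foldl_cons, List.foldl_nil]
  rw [pvNbStep_pos grid _ _ ((0 : Int), (1 : Int)) (by dsimp only; omega),
      pvNbStep_pos grid _ _ ((0 : Int), (-1 : Int)) (by dsimp only; omega),
      pvNbStep_pos grid _ _ ((1 : Int), (0 : Int)) (by dsimp only; omega),
      pvNbStep_pos grid _ _ ((-1 : Int), (0 : Int)) (by dsimp only; omega)]
  dsimp only
  rw [show (rn : Int) + 0 = ((rn : Nat) : Int) from by ring,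
      show (rn : Int) + 1 = ((rn + 1 : Nat) : Int) from by push_cast; ring,
      show (rn : Int) + -1 = ((rn - 1 : Nat) : Int) from by omega,
      show (cn : Int) + 1 = ((cn + 1 : Nat) : Int) from by push_cast; ring,
      show (cn : Int) + 0 = ((cn : Nat) : Int) from by ring,
      show (cn : Int) + -1 = ((cn - 1 : Nat) : Int) from by omega]
  simp only [pvCell, PySem.List.pyGetD_natCast, beq_iff_eq]
  unfold pvCondH pvCondV
  simp only [Bool.and_eq_true, beq_iff_eq]
  rw [show cn - 1 + 1 = cn from by omega, show rn - 1 + 1 = rn from by omega]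
  split_ifs <;> omega

-- ===== VERDICT (by name: the statement is the Claim_ definition above) =====
theorem count_junctions_py_spec : Claim_equal_count_junctions_py := by
  intro grid _ hpre
  unfold Spec_count_junctions_py
  rw [pvAlt_eq_deg]
  unfold count_junctions_py
  apply PySem.List.foldl_congr_mem
  intro acc r hrmem
  apply PySem.List.foldl_congr_mem
  intro acc2 c hcmem
  obtain ⟨hb1, hb2⟩ := hpre r hrmem c hcmem
  rw [PySem.List.mem_pyRange_one] at hrmem hcmem
  simp only [pvCell]
  by_cases hopen : PySem.List.pyGetD (PySem.List.pyGetD grid r []) c 1 == 0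
  · rw [if_pos hopen, if_pos hopen]
    have hopen' := (beq_iff_eq.mp hopen)
    obtain ⟨h1, h2, h3⟩ := hb2 hopen'
    have hrn : r = ((r.toNat : Nat) : Int) := (Int.toNat_of_nonneg (by omega)).symm
    have hcn : c = ((c.toNat : Nat) : Int) := (Int.toNat_of_nonneg (by omega)).symm
    have hr1' : r + 1 = ((r.toNat + 1 : Nat) : Int) := by omega
    have hrm1 : r - 1 = ((r.toNat - 1 : Nat) : Int) := by omega
    rw [hrn, hcn] at hopen' hb1
    rw [hrn, hcn] at h1
    rw [hr1', hcn] at h2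
    rw [hrm1, hcn] at h3
    simp only [PySem.List.pyGetD_natCast] at hopen' hb1 h1 h2 h3
    have heq := pvCellwise grid r.toNat c.toNat
      (by omega) (by omega) (by omega) (by omega)
      hopen' (by omega) (by omega) (by omega)
    rw [hrn, hcn, heq]
    simp only [PySem.List.pyGetD_natCast]
    rfl
  · rw [if_neg hopen, if_neg hopen]
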